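-- pv_equiv track=rewrite | github.com/pypi-data/pypi-mirror-251 | packages/babelnet/babelnet-1.2.0-py3-none-any.whl/babelnet/_utils.py | java_split
-- ===== SOURCE A (Python) =====
-- from typing import Optional, Sequence
--
-- def java_split(string: str, char: str) -> Sequence[str]:
--     """A version of the split that behaves like the java one.
--
--     @param string: the string to split
--     @type string: str
--     @param char: the character to use for splitting
--     @type char: str
--
--     @return: the initial string split in a sequence.
--     @rtype: Sequence[str]
--     """
--     if string == "":
--         return [""]
--     split = string.split(char)
--     i = len(split) - 1
--     while i >= 0 and split[i] == "":
--         split.pop(i)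
--         i -= 1
--     return split
-- ===== SOURCE B (Python) =====
-- def java_split(string, char):
--     """Split like Java's String.split: drop trailing empty fields.
--
--     Single forward pass: empty fields are held in a pending counter and
--     only flushed when a later non-empty field proves they are interior.
--     """
--     if string == "":
--         return [""]
--     result = []
--     pending = 0
--     for part in string.split(char):
--         if part == "":
--             pending += 1
--         else:
--             result.extend([""] * pending)
--             pending = 0
--             result.append(part)
--     return result
-- ===== Notes on version B (the rewrite author's own statement) =====
-- stated objective: alternative
-- what changed: Replaced the backward index-pop loop over the split list with a single forward pass keeping a pending-empties counter that is flushed only before a non-empty field; Pre_ excludes char == "", on which str.split raises ValueError in both programs.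
import Mathlib
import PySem

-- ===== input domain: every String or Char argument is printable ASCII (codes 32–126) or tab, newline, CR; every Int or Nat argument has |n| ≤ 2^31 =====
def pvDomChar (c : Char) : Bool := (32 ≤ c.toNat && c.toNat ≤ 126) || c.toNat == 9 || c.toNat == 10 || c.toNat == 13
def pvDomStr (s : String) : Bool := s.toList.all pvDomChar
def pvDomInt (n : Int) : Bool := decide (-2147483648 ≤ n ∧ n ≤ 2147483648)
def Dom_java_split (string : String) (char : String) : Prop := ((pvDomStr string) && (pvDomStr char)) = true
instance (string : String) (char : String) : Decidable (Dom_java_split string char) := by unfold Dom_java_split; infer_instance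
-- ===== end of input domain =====

-- B differs from A by a different decomposition: one forward pass with a pending-empties
-- counter instead of A's backward index-pop loop over the split list.

-- ===== PORT A =====
-- the while loop: i >= 0 and split[i] == "" → split.pop(i); i -= 1
def javaSplitPopLoop (split : List String) (i : Int) : List String :=
  if 0 ≤ i ∧ PySem.List.pyGet? split i = some "" then
    match h : PySem.List.pop? split i with
    | some r => javaSplitPopLoop r.2 (i - 1)
    | none => split
  else split
termination_by split.length
decreasing_by
  have := PySem.List.length_of_pop?_eq_some _ h
  omega

def java_split (string : String) (char : String) : List String :=
  if string == "" then [""]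
  else
    -- string.split(char); split? = none only for char = "", excluded by Pre_
    let split := (PySem.Str.split? string char).getD []
    javaSplitPopLoop split ((split.length : Int) - 1)

-- ===== PORT B =====
def java_split_alt (string : String) (char : String) : List String :=
  if string == "" then [""]
  else
    (((PySem.Str.split? string char).getD []).foldl
      (fun (st : List String × Nat) part =>
        if part == "" then (st.1, st.2 + 1)
        else (st.1 ++ List.replicate st.2 "" ++ [part], 0))
      ([], 0)).1

-- ===== PRECONDITION & SPEC =====
-- Pre_ excludes inputs where str.split raises ValueError (empty separator, in A and in B alike);
-- when string = "" the guard returns before splitting, so those inputs stay inside Pre_.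
def Pre_java_split (string : String) (char : String) : Prop := string = "" ∨ char ≠ ""
instance (string : String) (char : String) : Decidable (Pre_java_split string char) := by unfold Pre_java_split; infer_instance
def pvWitness_java_split : String × String := ("a,,b,", ",")

def Spec_java_split (string : String) (char : String) (out : List String) : Prop := out = java_split_alt string char
instance (string : String) (char : String) (out : List String) : Decidable (Spec_java_split string char out) := by unfold Spec_java_split; infer_instance

-- ===== CLAIM (what is proved, stated in full; the proofs are below) =====
def Claim_equal_java_split : Prop := ∀ (string : String) (char : String), Dom_java_split string char → Pre_java_split string char → Spec_java_split string char (java_split string char)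

-- ===== LEMMAS AND PROOFS =====

-- canonical "drop trailing empty strings"
def rstripE (l : List String) : List String := (l.reverse.dropWhile (· == "")).reverse

theorem rstripE_nil : rstripE [] = [] := rfl

theorem rstripE_append_empty (l : List String) : rstripE (l ++ [""]) = rstripE l := by
  simp [rstripE]

theorem rstripE_append_ne (l : List String) (a : String) (h : a ≠ "") :
    rstripE (l ++ [a]) = l ++ [a] := by
  simp [rstripE, h]

theorem rstripE_cons_empty (l : List String) :
    rstripE ("" :: l) = if rstripE l = [] then [] else "" :: rstripE l := by
  simp only [rstripE, List.reverse_cons, List.dropWhile_append]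
  by_cases h : (l.reverse.dropWhile (· == "")) = []
  · simp [h, List.dropWhile]
  · simp [h, List.isEmpty_iff]

theorem rstripE_cons_ne (a : String) (l : List String) (h : a ≠ "") :
    rstripE (a :: l) = a :: rstripE l := by
  have hb : (a == "") = false := beq_eq_false_iff_ne.mpr h
  simp only [rstripE, List.reverse_cons, List.dropWhile_append]
  by_cases h' : (l.reverse.dropWhile (· == "")) = []
  · simp [h', List.dropWhile, hb]
  · simp [h', List.isEmpty_iff]

-- A's pop loop computes rstripE
theorem popLoop_eq_rstripE (l : List String) :
    javaSplitPopLoop l ((l.length : Int) - 1) = rstripE l := by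
  induction l using List.reverseRecOn with
  | nil => rw [javaSplitPopLoop.eq_def]; simp [rstripE]
  | append_singleton l' a ih =>
    have hlen : ((l' ++ [a]).length : Int) - 1 = ((l'.length : Nat) : Int) := by simp
    have hget : PySem.List.pyGet? (l' ++ [a]) ((l'.length : Nat) : Int) = some a := by
      rw [PySem.List.pyGet?_natCast]; simp
    rw [javaSplitPopLoop.eq_def, hlen]
    by_cases ha : a = ""
    · subst ha
      have hpop : PySem.List.pop? (l' ++ [""]) ((l'.length : Nat) : Int) =
          some (("" : String), l') := by
        have hlt : l'.length < (l' ++ [""]).length := by simp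
        rw [PySem.List.pop?_natCast _ _ hlt]
        rw [List.eraseIdx_append_of_length_le (le_refl _)]
        simp
      rw [if_pos ⟨Int.natCast_nonneg _, hget⟩]
      split
      · next r heq =>
        rw [hpop] at heq
        injection heq with heq
        subst heq
        rw [rstripE_append_empty]
        exact ih
      · next heq =>
        rw [hpop] at heq
        exact absurd heq (by simp)
    · rw [if_neg]
      · exact (rstripE_append_ne l' a ha).symm
      · rintro ⟨-, h2⟩
        rw [hget] at h2
        injection h2 with h3
        exact ha h3

-- B's fold invariant
theorem fold_eq_rstripE (l : List String) : ∀ (acc : List String) (k : Nat),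
    (l.foldl
      (fun (st : List String × Nat) part =>
        if part == "" then (st.1, st.2 + 1)
        else (st.1 ++ List.replicate st.2 "" ++ [part], 0))
      (acc, k)).1
    = if rstripE l = [] then acc else acc ++ List.replicate k "" ++ rstripE l := by
  induction l with
  | nil => intro acc k; simp [rstripE_nil]
  | cons p l ih =>
    intro acc k
    by_cases hp : p = ""
    · subst hp
      simp only [List.foldl_cons, beq_self_eq_true, if_true]
      rw [ih, rstripE_cons_empty]
      by_cases h : rstripE l = []
      · simp [h]
      · simp [h, List.replicate_succ' (n := k)]
    · have hb : (p == "") = false := beq_eq_false_iff_ne.mpr hp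
      simp only [List.foldl_cons, hb, Bool.false_eq_true, if_false]
      rw [ih, rstripE_cons_ne p l hp]
      by_cases h : rstripE l = []
      · simp [h]
      · simp [h]

-- ===== VERDICT (by name: the statement is the Claim_ definition above) =====
theorem java_split_spec : Claim_equal_java_split := by
  intro string char _ _
  unfold Spec_java_split java_split java_split_alt
  by_cases hs : string == ""
  · simp [hs]
  · simp only [hs, Bool.false_eq_true, if_false]
    rw [popLoop_eq_rstripE, fold_eq_rstripE]
    by_cases h : rstripE ((PySem.Str.split? string char).getD []) = [] <;> simp [h]
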